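-- pv_equiv track=rewrite | github.com/cartersimon/learnpython1 | codewars_30-01-22.py | correct_my
-- ===== SOURCE A (Python) =====
-- def correct_my(s):
--     chlist = list(s)  # using list() to create an array from the string
--     output = []
--
--     for c in chlist:
--         if c == '5':
--             output.append('S')
--         elif c == '0':
--             output.append('O')
--         elif c == '1':
--             output.append('I')
--         else:
--             output.append(c)
--     return ''.join([str(item) for item in output])    # a list comprehension to convert back to a string
-- ===== SOURCE B (Python) =====
-- def correct_my(s):
--     # Three staged whole-string substitution passes instead of one
--     # per-character branching loop. Correct because the replacement
--     # letters S, O, I are disjoint from the digits 5, 0, 1, so later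
--     # passes never touch characters introduced by earlier ones.
--     return s.replace('5', 'S').replace('0', 'O').replace('1', 'I')
-- ===== Notes on version B (the rewrite author's own statement) =====
-- stated objective: idiomatic
-- what changed: Replaces the single per-character loop with an if/elif branch chain and a join by three staged whole-string replace passes (one substitution per pass), correct because the substituted letters are disjoint from the replaced digits.
import Mathlib
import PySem

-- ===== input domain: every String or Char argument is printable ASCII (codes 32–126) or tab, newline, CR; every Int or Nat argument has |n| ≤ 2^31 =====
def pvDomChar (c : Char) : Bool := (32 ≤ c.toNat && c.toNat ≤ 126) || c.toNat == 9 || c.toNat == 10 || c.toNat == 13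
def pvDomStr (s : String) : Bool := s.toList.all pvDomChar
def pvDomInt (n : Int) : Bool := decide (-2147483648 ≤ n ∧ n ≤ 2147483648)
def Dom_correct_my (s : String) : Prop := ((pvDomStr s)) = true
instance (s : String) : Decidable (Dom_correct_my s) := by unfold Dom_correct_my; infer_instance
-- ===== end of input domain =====

-- B replaces A's per-character if/elif loop + join by three staged whole-string replace passes (idiomatic).


-- ===== PORT A =====
-- literal transliteration: list(s), loop appending via if/elif chain, then join
def correct_my (s : String) : String :=
  let chlist := s.toList
  let output := chlist.foldl (fun acc c =>
    if c = '5' then acc ++ ['S']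
    else if c = '0' then acc ++ ['O']
    else if c = '1' then acc ++ ['I']
    else acc ++ [c]) []
  -- ''.join([str(item) for item in output]): str is identity on single chars
  String.ofList output

-- ===== PORT B =====
-- three staged replace passes: s.replace('5','S').replace('0','O').replace('1','I')
def correct_my_alt (s : String) : String :=
  PySem.Str.replace (PySem.Str.replace (PySem.Str.replace s "5" "S") "0" "O") "1" "I"

-- ===== PRECONDITION & SPEC =====
def Spec_correct_my (s : String) (out : String) : Prop := out = correct_my_alt s
instance (s : String) (out : String) : Decidable (Spec_correct_my s out) := by unfold Spec_correct_my; infer_instance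

-- ===== CLAIM =====
def Claim_equal_correct_my : Prop := ∀ (s : String), Dom_correct_my s → Spec_correct_my s (correct_my s)

-- ===== LEMMAS AND PROOFS =====
-- single-character replace is a pointwise map
theorem pvGo_single (a b : Char) (fuel : Nat) (l acc : List Char) (h : l.length ≤ fuel) :
    PySem.Chars.replace.go [a] [b] fuel l acc
      = acc.reverse ++ l.map (fun c => if c = a then b else c) := by
  induction fuel generalizing l acc with
  | zero =>
    interval_cases hl : l.length
    · cases l with
      | nil => simp [PySem.Chars.replace.go]
      | cons c t => simp at hl
  | succ fuel ih =>
    cases l with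
    | nil => simp [PySem.Chars.replace.go]
    | cons c t =>
      by_cases hc : c = a
      · have hp : List.isPrefixOf [a] (c :: t) = true := by
          simp [List.isPrefixOf, hc]
        rw [PySem.Chars.replace.go, if_pos hp]
        simp only [List.length_cons, List.length_nil, Nat.zero_add, List.drop_succ_cons,
          List.drop_zero]
        rw [ih t ([b].reverse ++ acc) (by simpa using Nat.le_of_succ_le_succ h)]
        simp [hc]
      · have hp : List.isPrefixOf [a] (c :: t) = false := by
          simp [List.isPrefixOf]; exact fun e => (hc e.symm).elim
        rw [PySem.Chars.replace.go, if_neg (by simp [hp])]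
        rw [ih t (c :: acc) (by simpa using Nat.le_of_succ_le_succ h)]
        simp [hc]

theorem pvReplace_single (a b : Char) (l : List Char) :
    PySem.Chars.replace l [a] [b] = l.map (fun c => if c = a then b else c) := by
  rw [PySem.Chars.replace, if_neg (by simp)]
  simpa using pvGo_single a b l.length l [] (le_refl _)

-- A's fold is the map of the if/elif chain
theorem pvFoldl_map (l : List Char) (acc : List Char) :
    l.foldl (fun acc c =>
      if c = '5' then acc ++ ['S']
      else if c = '0' then acc ++ ['O']
      else if c = '1' then acc ++ ['I']
      else acc ++ [c]) acc
    = acc ++ l.map (fun c =>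
        if c = '5' then 'S' else if c = '0' then 'O' else if c = '1' then 'I' else c) := by
  induction l generalizing acc with
  | nil => simp
  | cons c t ih =>
    simp only [List.foldl, List.map]
    rw [ih]
    by_cases h5 : c = '5' <;> by_cases h0 : c = '0' <;> by_cases h1 : c = '1' <;> simp_all

-- the three staged passes compose to the if/elif chain per character
theorem pvChain_eq (c : Char) :
    (if (if (if c = '5' then 'S' else c) = '0' then 'O' else if c = '5' then 'S' else c) = '1'
       then 'I'
       else if (if c = '5' then 'S' else c) = '0' then 'O' else if c = '5' then 'S' else c)
    = (if c = '5' then 'S' else if c = '0' then 'O' else if c = '1' then 'I' else c) := by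
  by_cases h5 : c = '5'
  · subst h5; decide
  by_cases h0 : c = '0'
  · subst h0; decide
  by_cases h1 : c = '1'
  · subst h1; decide
  simp [h5, h0, h1]

-- ===== VERDICT =====
theorem correct_my_spec : Claim_equal_correct_my := by
  intro s _
  unfold Spec_correct_my correct_my correct_my_alt
  have hB : (PySem.Str.replace (PySem.Str.replace (PySem.Str.replace s "5" "S") "0" "O") "1" "I").toList
      = s.toList.map (fun c =>
          if c = '5' then 'S' else if c = '0' then 'O' else if c = '1' then 'I' else c) := by
    rw [PySem.Str.toList_replace, PySem.Str.toList_replace, PySem.Str.toList_replace]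
    show PySem.Chars.replace (PySem.Chars.replace (PySem.Chars.replace s.toList ['5'] ['S']) ['0'] ['O']) ['1'] ['I'] = _
    rw [pvReplace_single, pvReplace_single, pvReplace_single]
    simp only [List.map_map]
    exact List.map_congr_left (fun c _ => pvChain_eq c)
  simp only []
  rw [pvFoldl_map, List.nil_append, ← hB, String.ofList_toList]
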